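-- pv_equiv track=rewrite | github.com/grahaminn/nltk-exercises | chapter1/ex17.py | findsentenceslicefrompost
-- ===== SOURCE A (Python) =====
-- def findsentenceslicefrompost(text, begin,end):
-- 	if ((begin == 0 or '.' in text[begin]) and (end==len(text) or '.' in text[end])):
-- 		return text[begin:end]
--
-- 	if not (begin == 0 or '.' in text[begin]):
-- 		begin -= 1
-- 	if not (end == len(text) or '.' in text[end]):
-- 		end += 1
-- 	return findsentenceslicefrompost(text, begin, end)
-- ===== SOURCE B (Python) =====
-- def findsentenceslicefrompost(text, begin, end):
--     while not (begin == 0 or '.' in text[begin]):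
--         begin -= 1
--     while not (end == len(text) or '.' in text[end]):
--         end += 1
--     return text[begin:end]
-- ===== Notes on version B (the rewrite author's own statement) =====
-- stated objective: simpler
-- what changed: Replaces A's simultaneous-step recursion (which re-tests both boundary guards every call and advances begin and end together) by two independent while-loop scans — begin leftward, end rightward — followed by a single slice.
import Mathlib
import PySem

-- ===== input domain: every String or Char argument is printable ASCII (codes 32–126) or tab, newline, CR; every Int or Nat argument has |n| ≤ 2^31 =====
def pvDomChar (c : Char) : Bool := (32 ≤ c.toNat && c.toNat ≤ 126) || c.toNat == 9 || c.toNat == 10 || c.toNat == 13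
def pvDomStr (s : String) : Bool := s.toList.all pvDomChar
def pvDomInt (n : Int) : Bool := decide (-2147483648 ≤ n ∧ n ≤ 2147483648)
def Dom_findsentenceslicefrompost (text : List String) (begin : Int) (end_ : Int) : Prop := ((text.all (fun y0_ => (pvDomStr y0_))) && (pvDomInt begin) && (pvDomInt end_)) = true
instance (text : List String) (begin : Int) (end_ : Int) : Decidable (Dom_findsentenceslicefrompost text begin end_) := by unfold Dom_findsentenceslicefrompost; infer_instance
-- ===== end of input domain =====

-- B replaces A's simultaneous-step recursion by two independent iterative scans (begin leftward,
-- end rightward) followed by a single slice; objective: simpler.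

-- ===== PORT A =====
-- 'begin == 0 or "." in text[begin]' : none = the '"." in text[begin]' indexing raises (IndexError)
def pvGuardB (text : List String) (b : Int) : Option Bool :=
  if b = 0 then some true
  else (PySem.List.pyGet? text b).map (fun s => PySem.Str.isIn "." s)

-- 'end == len(text) or "." in text[end]' : none = IndexError
def pvGuardE (text : List String) (e : Int) : Option Bool :=
  if e = (text.length : Int) then some true
  else (PySem.List.pyGet? text e).map (fun s => PySem.Str.isIn "." s)

theorem pvGuardB_false_bound (text : List String) (b : Int)
    (h : pvGuardB text b = some false) : -(text.length : Int) ≤ b ∧ b < text.length := by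
  unfold pvGuardB at h
  split at h
  · simp at h
  · cases hg : PySem.List.pyGet? text b with
    | none => rw [hg] at h; simp at h
    | some s =>
      have : ¬ PySem.List.pyGet? text b = none := by simp [hg]
      rw [PySem.List.pyGet?_eq_none_iff] at this
      have := not_not.mp this
      unfold PySem.Raise.InRange at this
      omega

theorem pvGuardE_false_bound (text : List String) (e : Int)
    (h : pvGuardE text e = some false) : -(text.length : Int) ≤ e ∧ e < text.length := by
  unfold pvGuardE at h
  split at h
  · simp at h
  · cases hg : PySem.List.pyGet? text e with
    | none => rw [hg] at h; simp at h
    | some s =>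
      have : ¬ PySem.List.pyGet? text e = none := by simp [hg]
      rw [PySem.List.pyGet?_eq_none_iff] at this
      have := not_not.mp this
      unfold PySem.Raise.InRange at this
      omega

-- literal port of A's recursion; where the Python raises IndexError the port returns []
-- (such inputs are excluded by Pre_ below)
def findsentenceslicefrompost (text : List String) (begin : Int) (end_ : Int) : List String :=
  match hB : pvGuardB text begin, hE : pvGuardE text end_ with
  | some gb, some ge =>
    if gb && ge then PySem.List.slice text (some begin) (some end_)
    else findsentenceslicefrompost text (if gb then begin else begin - 1)
           (if ge then end_ else end_ + 1)
  | _, _ => []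
termination_by ((begin + text.length + 1).toNat + (2 * (text.length : Int) + 1 - end_).toNat)
decreasing_by
  rename_i hne
  cases gb <;> cases ge <;> simp_all
  · have h1 := pvGuardB_false_bound text begin hB
    have h2 := pvGuardE_false_bound text end_ hE
    omega
  · have h1 := pvGuardB_false_bound text begin hB
    omega
  · have h2 := pvGuardE_false_bound text end_ hE
    omega

-- ===== PORT B =====
-- 'while not (begin == 0 or "." in text[begin]): begin -= 1'; none = IndexError inside the loop
def pvLoopB (text : List String) (b : Int) : Option Int :=
  if b = 0 then some b
  else match hg : PySem.List.pyGet? text b with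
    | none => none
    | some s => if PySem.Str.isIn "." s then some b else pvLoopB text (b - 1)
termination_by (b + text.length + 1).toNat
decreasing_by
  have : ¬ PySem.List.pyGet? text b = none := by simp [hg]
  rw [PySem.List.pyGet?_eq_none_iff] at this
  have := not_not.mp this
  unfold PySem.Raise.InRange at this
  omega

-- 'while not (end == len(text) or "." in text[end]): end += 1'
def pvLoopE (text : List String) (e : Int) : Option Int :=
  if e = (text.length : Int) then some e
  else match hg : PySem.List.pyGet? text e with
    | none => none
    | some s => if PySem.Str.isIn "." s then some e else pvLoopE text (e + 1)
termination_by (2 * (text.length : Int) + 1 - e).toNat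
decreasing_by
  have : ¬ PySem.List.pyGet? text e = none := by simp [hg]
  rw [PySem.List.pyGet?_eq_none_iff] at this
  have := not_not.mp this
  unfold PySem.Raise.InRange at this
  omega

def findsentenceslicefrompost_alt (text : List String) (begin : Int) (end_ : Int) : List String :=
  match pvLoopB text begin with
  | none => []
  | some b =>
    match pvLoopE text end_ with
    | none => []
    | some e => PySem.List.slice text (some b) (some e)

-- ===== PRECONDITION & SPEC =====
-- Pre_ is exactly the inputs on which the Python A returns (on all others both A and B raise
-- IndexError: an index beyond the list on either side, or a leftward scan from a negative index
-- that runs off the front without meeting a '.').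
def Pre_findsentenceslicefrompost (text : List String) (begin : Int) (end_ : Int) : Prop :=
  if text.length = 0 then begin = 0 ∧ end_ = 0
  else (-(text.length : Int) ≤ end_ ∧ end_ ≤ (text.length : Int)) ∧
    (begin = 0 ∨ (0 < begin ∧ begin < (text.length : Int)) ∨
      (-(text.length : Int) ≤ begin ∧ begin < 0 ∧
        ∃ s ∈ text.take (((text.length : Int) + begin).toNat + 1), PySem.Str.isIn "." s = true))
instance (text : List String) (begin : Int) (end_ : Int) : Decidable (Pre_findsentenceslicefrompost text begin end_) := by unfold Pre_findsentenceslicefrompost; infer_instance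

def pvWitness_findsentenceslicefrompost : List String × Int × Int := (["a.", "b"], 0, 1)

def Spec_findsentenceslicefrompost (text : List String) (begin : Int) (end_ : Int) (out : List String) : Prop := out = findsentenceslicefrompost_alt text begin end_
instance (text : List String) (begin : Int) (end_ : Int) (out : List String) : Decidable (Spec_findsentenceslicefrompost text begin end_ out) := by unfold Spec_findsentenceslicefrompost; infer_instance

-- ===== CLAIM (what is proved, stated in full; the proofs are below) =====
def Claim_equal_findsentenceslicefrompost : Prop := ∀ (text : List String) (begin : Int) (end_ : Int), Dom_findsentenceslicefrompost text begin end_ → Pre_findsentenceslicefrompost text begin end_ → Spec_findsentenceslicefrompost text begin end_ (findsentenceslicefrompost text begin end_)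

-- ===== LEMMAS AND PROOFS =====

theorem pvLoopB_of_guard_true (text : List String) (b : Int)
    (h : pvGuardB text b = some true) : pvLoopB text b = some b := by
  unfold pvGuardB at h
  unfold pvLoopB
  split at h
  · simp_all
  · cases hg : PySem.List.pyGet? text b with
    | none => rw [hg] at h; simp at h
    | some s => rw [hg] at h; simp_all

theorem pvLoopB_of_guard_false (text : List String) (b : Int)
    (h : pvGuardB text b = some false) : pvLoopB text b = pvLoopB text (b - 1) := by
  unfold pvGuardB at h
  split at h
  · simp at h
  · cases hg : PySem.List.pyGet? text b with
    | none => rw [hg] at h; simp at h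
    | some s =>
      rw [hg] at h
      simp only [Option.map_some, Option.some.injEq] at h
      conv_lhs => rw [pvLoopB]
      split
      · simp_all
      · split <;> simp_all [PySem.Str.isIn]

theorem pvLoopB_of_guard_none (text : List String) (b : Int)
    (h : pvGuardB text b = none) : pvLoopB text b = none := by
  unfold pvGuardB at h
  unfold pvLoopB
  split at h
  · simp at h
  · cases hg : PySem.List.pyGet? text b with
    | none => simp_all
    | some s => rw [hg] at h; simp at h

theorem pvLoopE_of_guard_true (text : List String) (e : Int)
    (h : pvGuardE text e = some true) : pvLoopE text e = some e := by
  unfold pvGuardE at h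
  unfold pvLoopE
  split at h
  · simp_all
  · cases hg : PySem.List.pyGet? text e with
    | none => rw [hg] at h; simp at h
    | some s => rw [hg] at h; simp_all

theorem pvLoopE_of_guard_false (text : List String) (e : Int)
    (h : pvGuardE text e = some false) : pvLoopE text e = pvLoopE text (e + 1) := by
  unfold pvGuardE at h
  split at h
  · simp at h
  · cases hg : PySem.List.pyGet? text e with
    | none => rw [hg] at h; simp at h
    | some s =>
      rw [hg] at h
      simp only [Option.map_some, Option.some.injEq] at h
      conv_lhs => rw [pvLoopE]
      split
      · simp_all
      · split <;> simp_all [PySem.Str.isIn]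

theorem pvLoopE_of_guard_none (text : List String) (e : Int)
    (h : pvGuardE text e = none) : pvLoopE text e = none := by
  unfold pvGuardE at h
  unfold pvLoopE
  split at h
  · simp at h
  · cases hg : PySem.List.pyGet? text e with
    | none => simp_all
    | some s => rw [hg] at h; simp at h

-- the two programs agree on EVERY input (both return [] exactly where their Pythons raise)
theorem pv_main (text : List String) (b e : Int) :
    findsentenceslicefrompost text b e = findsentenceslicefrompost_alt text b e := by
  fun_induction findsentenceslicefrompost text b e with
  | case1 b e gb ge hB hE hif =>
    have hgb : gb = true := by cases gb <;> simp_all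
    have hge : ge = true := by cases ge <;> simp_all
    subst hgb hge
    unfold findsentenceslicefrompost_alt
    rw [pvLoopB_of_guard_true text b hB, pvLoopE_of_guard_true text e hE]
  | case2 b e gb ge hB hE hif ih =>
    unfold findsentenceslicefrompost_alt
    cases gb <;> cases ge
    case true.true => simp at hif
    case false.false =>
      simp only [Bool.false_eq_true, dite_false, if_false] at ih ⊢
      rw [ih]
      unfold findsentenceslicefrompost_alt
      rw [pvLoopB_of_guard_false text b hB, pvLoopE_of_guard_false text e hE]
    case false.true =>
      simp only [Bool.false_eq_true, dite_false, dite_true, if_false, if_true] at ih ⊢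
      rw [ih]
      unfold findsentenceslicefrompost_alt
      rw [pvLoopB_of_guard_false text b hB]
    case true.false =>
      simp only [Bool.false_eq_true, dite_false, dite_true, if_false, if_true] at ih ⊢
      rw [ih]
      unfold findsentenceslicefrompost_alt
      rw [pvLoopE_of_guard_false text e hE]
  | case3 b e h1 =>
    unfold findsentenceslicefrompost_alt
    rcases hB : pvGuardB text b with _ | gb
    · rw [pvLoopB_of_guard_none text b hB]
    · rcases hE : pvGuardE text e with _ | ge
      · rw [pvLoopE_of_guard_none text e hE]
        cases pvLoopB text b <;> rfl
      · exact (h1 gb ge hB hE).elim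

-- ===== VERDICT (by name: the statement is the Claim_ definition above) =====
theorem findsentenceslicefrompost_spec : Claim_equal_findsentenceslicefrompost := by
  intro text b e _ _
  unfold Spec_findsentenceslicefrompost
  exact pv_main text b e
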